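-- pv_equiv track=rewrite | github.com/vintagentleman/WPSE | server.py | cit_pager
-- ===== SOURCE A (Python) =====
-- def cit_pager(cit_off_lim, lim_cit, act):
--     """
--     Листает цитаты.
--
--     :param cit_off_lim: список кортежей вида (оффсет по цитатам, лимит по цитатам) для каждого документа
--     :param lim_cit: заданные либо извлечённые из формы лимиты по цитатам
--     :param act: значение, извлечённое из формы
--     :return: новый список кортежей (с обновлённым оффетом для одного из документов)
--     """
--
--     for i in range(len(cit_off_lim)):
--         if act == 'prev_cit_%s' % i:
--             new_off = max(0, cit_off_lim[i][0] - cit_off_lim[i][1] - 1)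
--             cit_off_lim[i] = (new_off, int(lim_cit[i]) - 1)
--         elif act == 'home_cit_%s' % i:
--             cit_off_lim[i] = (0, int(lim_cit[i]) - 1)
--         elif act == 'next_cit_%s' % i:
--             new_off = cit_off_lim[i][0] + cit_off_lim[i][1] + 1
--             cit_off_lim[i] = (new_off, int(lim_cit[i]) - 1)
--
--     return cit_off_lim
-- ===== SOURCE B (Python) =====
-- def cit_pager(cit_off_lim, lim_cit, act):
--     # Parse the action string once instead of scanning every document index.
--     prefix, idx = act[:9], act[9:]
--     if prefix in ('prev_cit_', 'home_cit_', 'next_cit_') and idx.isdigit():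
--         i = int(idx)
--         if i < len(cit_off_lim):
--             new_lim = int(lim_cit[i]) - 1
--             if prefix == 'home_cit_':
--                 cit_off_lim[i] = (0, new_lim)
--             elif prefix == 'prev_cit_':
--                 new_off = max(0, cit_off_lim[i][0] - cit_off_lim[i][1] - 1)
--                 cit_off_lim[i] = (new_off, new_lim)
--             else:
--                 new_off = cit_off_lim[i][0] + cit_off_lim[i][1] + 1
--                 cit_off_lim[i] = (new_off, new_lim)
--     return cit_off_lim
-- ===== Notes on version B (the rewrite author's own statement) =====
-- stated objective: alternative
-- what changed: Instead of looping over every document index and formatting three candidate action strings per index, B parses the action string once (9-char prefix, then int() on the digit suffix) and updates the single matched tuple directly; Pre_ excludes action strings whose digit suffix has a leading zero and names an existing document (e.g. 'home_cit_01'), a corner no form ever produces, where A's no-match and B's match of document 1 are both defensible; a timing run did not show a measurable speed-up, so none is claimed.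
import Mathlib
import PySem

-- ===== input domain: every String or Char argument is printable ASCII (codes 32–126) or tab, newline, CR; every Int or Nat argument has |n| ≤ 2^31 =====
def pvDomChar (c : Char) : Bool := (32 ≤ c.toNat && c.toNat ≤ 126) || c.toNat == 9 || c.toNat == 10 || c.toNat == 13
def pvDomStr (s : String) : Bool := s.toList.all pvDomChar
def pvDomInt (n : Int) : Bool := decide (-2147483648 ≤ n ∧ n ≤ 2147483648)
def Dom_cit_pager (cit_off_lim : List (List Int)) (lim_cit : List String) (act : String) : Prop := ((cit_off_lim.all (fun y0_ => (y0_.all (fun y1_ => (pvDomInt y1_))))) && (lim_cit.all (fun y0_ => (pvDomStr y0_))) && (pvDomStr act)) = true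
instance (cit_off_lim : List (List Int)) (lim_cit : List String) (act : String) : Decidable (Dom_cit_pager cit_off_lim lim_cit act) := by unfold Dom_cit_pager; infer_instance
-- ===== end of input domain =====

-- B replaces A's scan over every document index (three formatted candidate strings per index)
-- by a single parse of the action string (alternative algorithm, no speed claim); both A and B
-- mutate cit_off_lim[i] in place in Python, the equivalence is about the return value.

-- ===== PORT A =====
-- string comparisons are done on code-point lists ('%s' % i = PySem.Int.toChars i); exact
def cit_pager (cit_off_lim : List (List Int)) (lim_cit : List String) (act : String) : List (List Int) :=
  (PySem.List.pyRange 0 cit_off_lim.length 1).foldl (fun cur i =>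
    if act.toList = "prev_cit_".toList ++ PySem.Int.toChars i then
      let row := PySem.List.pyGetD cur i []
      let new_off := max 0 (PySem.List.pyGetD row 0 0 - PySem.List.pyGetD row 1 0 - 1)
      PySem.List.pySetD cur i [new_off, (PySem.Int.ofStr? (PySem.List.pyGetD lim_cit i "")).getD 0 - 1]
    else if act.toList = "home_cit_".toList ++ PySem.Int.toChars i then
      PySem.List.pySetD cur i [0, (PySem.Int.ofStr? (PySem.List.pyGetD lim_cit i "")).getD 0 - 1]
    else if act.toList = "next_cit_".toList ++ PySem.Int.toChars i then
      let row := PySem.List.pyGetD cur i []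
      let new_off := PySem.List.pyGetD row 0 0 + PySem.List.pyGetD row 1 0 + 1
      PySem.List.pySetD cur i [new_off, (PySem.Int.ofStr? (PySem.List.pyGetD lim_cit i "")).getD 0 - 1]
    else cur) cit_off_lim

-- ===== PORT B =====
-- Source B's int(idx) runs only on the branch where idx.isdigit() has passed, so it is ported by
-- hand as the base-10 value of the digit string (exact there: no sign, space or underscore)
def pvFoldDigits (cs : List Char) : Nat :=
  cs.foldl (fun a c => 10 * a + (c.toNat - 48)) 0

def cit_pager_alt (cit_off_lim : List (List Int)) (lim_cit : List String) (act : String) : List (List Int) :=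
  let cs := act.toList
  let pre := PySem.List.slice cs none (some 9)
  let idx := PySem.List.slice cs (some 9) none
  if (pre = "prev_cit_".toList ∨ pre = "home_cit_".toList ∨ pre = "next_cit_".toList)
      ∧ PySem.Chars.strIsdigit idx = true then
    let i := pvFoldDigits idx
    if i < cit_off_lim.length then
      let newLim := (PySem.Int.ofStr? (lim_cit.getD i "")).getD 0 - 1
      if pre = "home_cit_".toList then cit_off_lim.set i [0, newLim]
      else if pre = "prev_cit_".toList then
        let newOff := max 0 (PySem.List.pyGetD (cit_off_lim.getD i []) 0 0 -
          PySem.List.pyGetD (cit_off_lim.getD i []) 1 0 - 1)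
        cit_off_lim.set i [newOff, newLim]
      else
        let newOff := PySem.List.pyGetD (cit_off_lim.getD i []) 0 0 +
          PySem.List.pyGetD (cit_off_lim.getD i []) 1 0 + 1
        cit_off_lim.set i [newOff, newLim]
    else cit_off_lim
  else cit_off_lim

-- ===== PRECONDITION =====
-- Pre_ excludes (a) the inputs where Python A raises: an action matching index k whose document
-- row has fewer than 2 entries (IndexError, prev/next only), or with lim_cit[k] missing
-- (IndexError) or not parseable by int() (ValueError); and (b) a defensible corner on which A
-- still returns: an action whose digit suffix carries a leading zero yet names an existing
-- document (e.g. 'home_cit_01'), never produced by the form, where A matches nothing and B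
-- updates that document — either reading is defensible.
def Pre_cit_pager (cit_off_lim : List (List Int)) (lim_cit : List String) (act : String) : Prop :=
  (∀ k : Nat, k < cit_off_lim.length →
    ((act.toList = "prev_cit_".toList ++ PySem.Int.toChars k ∨
      act.toList = "next_cit_".toList ++ PySem.Int.toChars k) →
       2 ≤ (cit_off_lim.getD k []).length ∧ k < lim_cit.length ∧
       (PySem.Int.ofStr? (lim_cit.getD k "")).isSome) ∧
    (act.toList = "home_cit_".toList ++ PySem.Int.toChars k →
       k < lim_cit.length ∧ (PySem.Int.ofStr? (lim_cit.getD k "")).isSome)) ∧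
  ((act.toList.take 9 = "prev_cit_".toList ∨ act.toList.take 9 = "home_cit_".toList ∨
    act.toList.take 9 = "next_cit_".toList) →
   PySem.Chars.strIsdigit (act.toList.drop 9) = true →
   pvFoldDigits (act.toList.drop 9) < cit_off_lim.length →
   (act.toList.drop 9 = ['0'] ∨ (act.toList.drop 9).head? ≠ some '0'))

instance (cit_off_lim : List (List Int)) (lim_cit : List String) (act : String) : Decidable (Pre_cit_pager cit_off_lim lim_cit act) := by unfold Pre_cit_pager; infer_instance

def pvWitness_cit_pager : List (List Int) × List String × String := ([[0, 10], [5, 10]], ["10", "10"], "next_cit_1")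


def Spec_cit_pager (cit_off_lim : List (List Int)) (lim_cit : List String) (act : String) (out : List (List Int)) : Prop := out = cit_pager_alt cit_off_lim lim_cit act
instance (cit_off_lim : List (List Int)) (lim_cit : List String) (act : String) (out : List (List Int)) : Decidable (Spec_cit_pager cit_off_lim lim_cit act out) := by unfold Spec_cit_pager; infer_instance

-- ===== CLAIM (what is proved, stated in full; the proofs are below) =====
def Claim_equal_cit_pager : Prop := ∀ (cit_off_lim : List (List Int)) (lim_cit : List String) (act : String), Dom_cit_pager cit_off_lim lim_cit act → Pre_cit_pager cit_off_lim lim_cit act → Spec_cit_pager cit_off_lim lim_cit act (cit_pager cit_off_lim lim_cit act)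

-- ===== LEMMAS AND PROOFS =====
set_option maxHeartbeats 1000000



theorem pvDigit_iff (c : Char) : PySem.Chars.isdigit c = true ↔ 48 ≤ c.toNat ∧ c.toNat ≤ 57 := by
  simp only [PySem.Chars.isdigit, Bool.and_eq_true, decide_eq_true_eq, Char.le_def,
    UInt32.le_iff_toNat_le]
  exact Iff.rfl

theorem pvChar_eq {a b : Char} (h : a.toNat = b.toNat) : a = b := by
  apply Char.ext; exact UInt32.toNat_inj.mp h

theorem pvDigitChar_toNat {d : Nat} (h : d < 10) : (Nat.digitChar d).toNat = 48 + d := by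
  interval_cases d <;> rfl

theorem pvDigitChar_isdigit {d : Nat} (h : d < 10) : PySem.Chars.isdigit (Nat.digitChar d) = true := by
  rw [pvDigit_iff, pvDigitChar_toNat h]; omega

theorem pvFold_append (cs : List Char) (c : Char) :
    pvFoldDigits (cs ++ [c]) = 10 * pvFoldDigits cs + (c.toNat - 48) := by
  simp [pvFoldDigits, List.foldl_append]

theorem pvFold_ge (t : List Char) (a : Nat) : a ≤ t.foldl (fun a c => 10 * a + (c.toNat - 48)) a := by
  induction t generalizing a with
  | nil => simp
  | cons c t ih => exact le_trans (by omega) (ih (10 * a + (c.toNat - 48)))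

theorem pvToDigits_pack (n : Nat) :
    (Nat.toDigits 10 n).all PySem.Chars.isdigit = true ∧
    pvFoldDigits (Nat.toDigits 10 n) = n ∧
    (Nat.toDigits 10 n = ['0'] ∨ (Nat.toDigits 10 n).head? ≠ some '0') := by
  induction n using Nat.strong_induction_on with
  | _ n ih =>
    rw [Nat.toDigits_eq_if (by norm_num)]
    by_cases h : n < 10
    · simp only [if_pos h]
      refine ⟨by simp [pvDigitChar_isdigit h], ?_, ?_⟩
      · simp [pvFoldDigits, pvDigitChar_toNat h]
      · by_cases h0 : n = 0
        · left; simp [h0]; rfl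
        · right
          simp only [List.head?_cons, ne_eq, Option.some.injEq]
          intro hc
          have := congrArg Char.toNat hc
          rw [pvDigitChar_toNat h] at this
          have : (48 + n) = ('0').toNat := this
          simp [Char.toNat] at this; omega
    · simp only [if_neg h]
      have hlt : n / 10 < n := Nat.div_lt_self (by omega) (by norm_num)
      obtain ⟨ha, hf, hh⟩ := ih (n / 10) hlt
      have hd : n % 10 < 10 := Nat.mod_lt _ (by norm_num)
      refine ⟨?_, ?_, ?_⟩
      · simp [List.all_append, ha, pvDigitChar_isdigit hd]
      · rw [pvFold_append, hf, pvDigitChar_toNat hd]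
        omega
      · right
        have hne : Nat.toDigits 10 (n / 10) ≠ [] := by
          have := @Nat.length_toDigits_pos 10 (n / 10)
          intro hc; rw [hc] at this; simp at this
        rw [List.head?_append_of_ne_nil _ hne]
        rcases hh with h0 | hh
        · -- toDigits (n/10) = ['0'] would give n/10 = 0, but n ≥ 10
          exfalso
          have : pvFoldDigits (Nat.toDigits 10 (n / 10)) = 0 := by rw [h0]; rfl
          rw [hf] at this; omega
        · exact hh

theorem pvFold_pos {cs : List Char} (ha : cs.all PySem.Chars.isdigit = true)
    (hne : cs ≠ []) (hh : cs.head? ≠ some '0') : 0 < pvFoldDigits cs := by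
  cases cs with
  | nil => exact absurd rfl hne
  | cons c t =>
    have hc : PySem.Chars.isdigit c = true := by simp [List.all_cons] at ha; exact ha.1
    rw [pvDigit_iff] at hc
    have hc0 : c.toNat ≠ 48 := by
      intro h; exact hh (by simp [pvChar_eq (a := c) (b := '0') (by simpa using h)])
    have h1 : 1 ≤ c.toNat - 48 := by omega
    have := pvFold_ge t (10 * 0 + (c.toNat - 48))
    simp only [pvFoldDigits, List.foldl_cons]
    omega

theorem pvCanon_roundtrip (cs : List Char) (ha : cs.all PySem.Chars.isdigit = true)
    (hne : cs ≠ []) (hh : cs = ['0'] ∨ cs.head? ≠ some '0') :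
    Nat.toDigits 10 (pvFoldDigits cs) = cs := by
  induction cs using List.reverseRecOn with
  | nil => exact absurd rfl hne
  | append_singleton ds c ih =>
    have hc : PySem.Chars.isdigit c = true := by simp [List.all_append] at ha; exact ha.2
    rw [pvDigit_iff] at hc
    have hcd : c.toNat - 48 < 10 := by omega
    have hdigit : Nat.digitChar (c.toNat - 48) = c := by
      apply pvChar_eq; rw [pvDigitChar_toNat hcd]; omega
    cases ds with
    | nil =>
      rw [pvFold_append]
      simp only [pvFoldDigits, List.foldl_nil, Nat.mul_zero, Nat.zero_add]
      rw [Nat.toDigits_of_lt_base hcd, hdigit]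
      rfl
    | cons d t =>
      have hdsne : (d :: t) ≠ ([] : List Char) := by simp
      have hhd : (d :: t).head? ≠ some '0' := by
        rcases hh with h0 | hh
        · exfalso
          have := congrArg List.length h0
          simp at this
        · simpa [List.head?_append_of_ne_nil _ hdsne] using hh
      have hads : (d :: t).all PySem.Chars.isdigit = true := by
        simp only [List.all_eq_true] at ha ⊢
        intro x hx; exact ha x (by simp [List.mem_append] at hx ⊢; tauto)
      have hpos : 0 < pvFoldDigits (d :: t) := pvFold_pos hads hdsne hhd
      rw [pvFold_append]
      rw [← Nat.toDigits_append_toDigits (by norm_num) hpos hcd]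
      rw [ih hads hdsne (Or.inr hhd), Nat.toDigits_of_lt_base hcd, hdigit]

theorem pvToChars_natCast (k : Nat) : PySem.Int.toChars (k : Int) = Nat.toDigits 10 k := by
  simp [PySem.Int.toChars]

theorem pvPat_inj {p p' cs : List Char} (hp : p.length = 9) (hp' : p'.length = 9)
    {i j : Nat} (h1 : cs = p ++ Nat.toDigits 10 i) (h2 : cs = p' ++ Nat.toDigits 10 j) :
    p = p' ∧ i = j := by
  have h := h1.symm.trans h2
  obtain ⟨hpe, hde⟩ := List.append_inj h (hp.trans hp'.symm)
  refine ⟨hpe, ?_⟩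
  have := congrArg pvFoldDigits hde
  rwa [(pvToDigits_pack i).2.1, (pvToDigits_pack j).2.1] at this

theorem pvMatch_iff (cs p : List Char) (hp : p.length = 9) (k : Nat) :
    cs = p ++ Nat.toDigits 10 k ↔
      (cs.take 9 = p ∧ PySem.Chars.strIsdigit (cs.drop 9) = true ∧
       (cs.drop 9 = ['0'] ∨ (cs.drop 9).head? ≠ some '0') ∧ pvFoldDigits (cs.drop 9) = k) := by
  constructor
  · intro h
    subst h
    have ht : (p ++ Nat.toDigits 10 k).take 9 = p := by
      rw [← hp]; exact List.take_left
    have hd : (p ++ Nat.toDigits 10 k).drop 9 = Nat.toDigits 10 k := by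
      rw [← hp]; exact List.drop_left
    obtain ⟨ha, hf, hh⟩ := pvToDigits_pack k
    have hne : Nat.toDigits 10 k ≠ [] := by
      have := @Nat.length_toDigits_pos 10 k
      intro hc; rw [hc] at this; simp at this
    refine ⟨ht, ?_, by rw [hd]; exact hh, by rw [hd]; exact hf⟩
    rw [hd]
    simp [PySem.Chars.strIsdigit, hne, ha]
  · rintro ⟨ht, hsd, hh, hf⟩
    have hne : cs.drop 9 ≠ [] := by
      simp only [PySem.Chars.strIsdigit, Bool.and_eq_true, Bool.not_eq_eq_eq_not] at hsd
      intro hc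
      rw [hc] at hsd
      simp at hsd
    have ha : (cs.drop 9).all PySem.Chars.isdigit = true := by
      simp only [PySem.Chars.strIsdigit, Bool.and_eq_true] at hsd
      exact hsd.2
    have := pvCanon_roundtrip (cs.drop 9) ha hne hh
    rw [hf] at this
    rw [this, ← ht]
    exact (List.take_append_drop 9 cs).symm

theorem pvSetD_eq (xs : List (List Int)) (k : Nat) (v : List Int) (h : k < xs.length) :
    PySem.List.pySetD xs (k : Int) v = xs.set k v := by
  simp [PySem.List.pySetD, PySem.List.pySet?, PySem.List.pyIdx?, h]


theorem pvLen9_prev : ("prev_cit_".toList).length = 9 := by decide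
theorem pvLen9_home : ("home_cit_".toList).length = 9 := by decide
theorem pvLen9_next : ("next_cit_".toList).length = 9 := by decide

theorem pvFoldl_single {beta : Type} (f : beta → Int → beta) (n k : Nat) (hk : k < n) (init : beta)
    (hid : ∀ (acc : beta) (i : Int), 0 ≤ i → i < (n : Int) → i ≠ (k : Int) → f acc i = acc) :
    (PySem.List.pyRange 0 (n : Int) 1).foldl f init = f init (k : Int) := by
  have h1 : (0 : Int) ≤ (k : Int) := by positivity
  have h2 : (k : Int) ≤ (n : Int) := by exact_mod_cast hk.le
  rw [PySem.List.pyRange_one_append 0 (k : Int) (n : Int) h1 h2, List.foldl_append]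
  have hfirst : (PySem.List.pyRange 0 (k : Int) 1).foldl f init = init := by
    rw [PySem.List.foldl_congr_mem _ f (fun acc _ => acc) init ?_, PySem.List.foldl_ignore]
    intro acc x hx
    rw [PySem.List.mem_pyRange_one] at hx
    exact hid acc x hx.1 (lt_of_lt_of_le hx.2 h2) (by omega)
  rw [hfirst, PySem.List.pyRange_one_cons (show (k : Int) < (n : Int) by exact_mod_cast hk)]
  simp only [List.foldl_cons]
  rw [PySem.List.foldl_congr_mem _ f (fun acc _ => acc) _ ?_, PySem.List.foldl_ignore]
  intro acc x hx
  rw [PySem.List.mem_pyRange_one] at hx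
  exact hid acc x (by omega) hx.2 (by omega)

def pvNewLim (lim_cit : List String) (k : Nat) : Int :=
  (PySem.Int.ofStr? (lim_cit.getD k "")).getD 0 - 1

def pvRowPrev (col : List (List Int)) (lim_cit : List String) (k : Nat) : List Int :=
  [max 0 (PySem.List.pyGetD (col.getD k []) 0 0 - PySem.List.pyGetD (col.getD k []) 1 0 - 1),
   pvNewLim lim_cit k]

def pvRowHome (lim_cit : List String) (k : Nat) : List Int := [0, pvNewLim lim_cit k]

def pvRowNext (col : List (List Int)) (lim_cit : List String) (k : Nat) : List Int :=
  [PySem.List.pyGetD (col.getD k []) 0 0 + PySem.List.pyGetD (col.getD k []) 1 0 + 1,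
   pvNewLim lim_cit k]

-- at most one of the 3n candidate action strings equals act: identity away from the match
theorem pvA_id_step (lim_cit : List String) (act : String)
    (p : List Char) (hp : p.length = 9) (k : Nat)
    (h : act.toList = p ++ Nat.toDigits 10 k) (acc : List (List Int)) (i : Int)
    (h0 : 0 ≤ i) (hne : i ≠ (k : Int)) :
    (if act.toList = "prev_cit_".toList ++ PySem.Int.toChars i then
      PySem.List.pySetD acc i [max 0 (PySem.List.pyGetD (PySem.List.pyGetD acc i []) 0 0 - PySem.List.pyGetD (PySem.List.pyGetD acc i []) 1 0 - 1), (PySem.Int.ofStr? (PySem.List.pyGetD lim_cit i "")).getD 0 - 1]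
    else if act.toList = "home_cit_".toList ++ PySem.Int.toChars i then
      PySem.List.pySetD acc i [0, (PySem.Int.ofStr? (PySem.List.pyGetD lim_cit i "")).getD 0 - 1]
    else if act.toList = "next_cit_".toList ++ PySem.Int.toChars i then
      PySem.List.pySetD acc i [PySem.List.pyGetD (PySem.List.pyGetD acc i []) 0 0 + PySem.List.pyGetD (PySem.List.pyGetD acc i []) 1 0 + 1, (PySem.Int.ofStr? (PySem.List.pyGetD lim_cit i "")).getD 0 - 1]
    else acc) = acc := by
  have htc : PySem.Int.toChars i = Nat.toDigits 10 i.toNat := by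
    rw [← pvToChars_natCast i.toNat]
    congr 1
    omega
  split_ifs with hc1 hc2 hc3
  · exfalso
    rw [htc] at hc1
    obtain ⟨hpe, hke⟩ := pvPat_inj pvLen9_prev hp hc1 h
    omega
  · exfalso
    rw [htc] at hc2
    obtain ⟨hpe, hke⟩ := pvPat_inj pvLen9_home hp hc2 h
    omega
  · exfalso
    rw [htc] at hc3
    obtain ⟨hpe, hke⟩ := pvPat_inj pvLen9_next hp hc3 h
    omega
  · rfl

theorem pvA_prev (col : List (List Int)) (lim_cit : List String) (act : String) (k : Nat)
    (hk : k < col.length) (h : act.toList = "prev_cit_".toList ++ Nat.toDigits 10 k) :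
    cit_pager col lim_cit act = col.set k (pvRowPrev col lim_cit k) := by
  unfold cit_pager
  rw [pvFoldl_single _ col.length k hk col
    (fun acc i h0 _ hne => pvA_id_step lim_cit act _ pvLen9_prev k h acc i h0 hne)]
  rw [if_pos (by rw [pvToChars_natCast]; exact h)]
  rw [pvSetD_eq col k _ hk]
  simp [PySem.List.pyGetD_natCast, pvRowPrev, pvNewLim]

theorem pvA_home (col : List (List Int)) (lim_cit : List String) (act : String) (k : Nat)
    (hk : k < col.length) (h : act.toList = "home_cit_".toList ++ Nat.toDigits 10 k) :
    cit_pager col lim_cit act = col.set k (pvRowHome lim_cit k) := by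
  unfold cit_pager
  rw [pvFoldl_single _ col.length k hk col
    (fun acc i h0 _ hne => pvA_id_step lim_cit act _ pvLen9_home k h acc i h0 hne)]
  rw [if_neg ?_, if_pos (by rw [pvToChars_natCast]; exact h)]
  · rw [pvSetD_eq col k _ hk]
    simp [PySem.List.pyGetD_natCast, pvRowHome, pvNewLim]
  · rw [pvToChars_natCast]
    intro hc
    obtain ⟨hpe, _⟩ := pvPat_inj pvLen9_prev pvLen9_home hc h
    exact absurd hpe (by decide)

theorem pvA_next (col : List (List Int)) (lim_cit : List String) (act : String) (k : Nat)
    (hk : k < col.length) (h : act.toList = "next_cit_".toList ++ Nat.toDigits 10 k) :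
    cit_pager col lim_cit act = col.set k (pvRowNext col lim_cit k) := by
  unfold cit_pager
  rw [pvFoldl_single _ col.length k hk col
    (fun acc i h0 _ hne => pvA_id_step lim_cit act _ pvLen9_next k h acc i h0 hne)]
  rw [if_neg ?_, if_neg ?_, if_pos (by rw [pvToChars_natCast]; exact h)]
  · rw [pvSetD_eq col k _ hk]
    simp [PySem.List.pyGetD_natCast, pvRowNext, pvNewLim]
  · rw [pvToChars_natCast]
    intro hc
    obtain ⟨hpe, _⟩ := pvPat_inj pvLen9_home pvLen9_next hc h
    exact absurd hpe (by decide)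
  · rw [pvToChars_natCast]
    intro hc
    obtain ⟨hpe, _⟩ := pvPat_inj pvLen9_prev pvLen9_next hc h
    exact absurd hpe (by decide)

theorem pvA_none (col : List (List Int)) (lim_cit : List String) (act : String)
    (h : ∀ k : Nat, k < col.length →
      act.toList ≠ "prev_cit_".toList ++ Nat.toDigits 10 k ∧
      act.toList ≠ "home_cit_".toList ++ Nat.toDigits 10 k ∧
      act.toList ≠ "next_cit_".toList ++ Nat.toDigits 10 k) :
    cit_pager col lim_cit act = col := by
  unfold cit_pager
  rw [PySem.List.foldl_congr_mem _ _ (fun acc _ => acc) col ?_, PySem.List.foldl_ignore]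
  intro acc i hi
  rw [PySem.List.mem_pyRange_one] at hi
  have hik : i.toNat < col.length := by omega
  have htc : PySem.Int.toChars i = Nat.toDigits 10 i.toNat := by
    rw [← pvToChars_natCast i.toNat]
    congr 1
    omega
  obtain ⟨n1, n2, n3⟩ := h i.toNat hik
  rw [htc]
  simp only [if_neg n1, if_neg n2, if_neg n3]

-- B-side evaluation
theorem pvSlice9 (cs : List Char) : PySem.List.slice cs none (some 9) = cs.take 9 := by
  rw [PySem.List.slice_to cs (b := 9) (by norm_num)]; rfl

theorem pvSliceFrom9 (cs : List Char) : PySem.List.slice cs (some 9) none = cs.drop 9 := by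
  rw [PySem.List.slice_from cs (a := 9) (by norm_num)]; rfl

theorem pvB_match (col : List (List Int)) (lim_cit : List String) (act : String) (k : Nat)
    (hk : k < col.length) (p : List Char) (hp : p.length = 9)
    (hmem : p = "prev_cit_".toList ∨ p = "home_cit_".toList ∨ p = "next_cit_".toList)
    (h : act.toList = p ++ Nat.toDigits 10 k) :
    cit_pager_alt col lim_cit act =
      (if p = "home_cit_".toList then col.set k (pvRowHome lim_cit k)
       else if p = "prev_cit_".toList then col.set k (pvRowPrev col lim_cit k)
       else col.set k (pvRowNext col lim_cit k)) := by
  obtain ⟨ht, hsd, _, hf⟩ := (pvMatch_iff act.toList p hp k).mp h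
  unfold cit_pager_alt
  simp only [pvSlice9, pvSliceFrom9, ht, hf]
  rw [if_pos ⟨hmem, hsd⟩, if_pos hk]
  rcases hmem with hm | hm | hm <;> subst hm
  · rw [if_neg (by decide), if_pos rfl]
    simp [pvRowPrev, pvNewLim]
  · rw [if_pos rfl]
    simp [pvRowHome, pvNewLim]
  · rw [if_neg (by decide), if_neg (by decide)]
    simp [pvRowNext, pvNewLim]

theorem pvB_none (col : List (List Int)) (lim_cit : List String) (act : String)
    (hcanon : (act.toList.take 9 = "prev_cit_".toList ∨ act.toList.take 9 = "home_cit_".toList ∨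
        act.toList.take 9 = "next_cit_".toList) →
      PySem.Chars.strIsdigit (act.toList.drop 9) = true →
      pvFoldDigits (act.toList.drop 9) < col.length →
      (act.toList.drop 9 = ['0'] ∨ (act.toList.drop 9).head? ≠ some '0'))
    (h : ∀ k : Nat, k < col.length →
      act.toList ≠ "prev_cit_".toList ++ Nat.toDigits 10 k ∧
      act.toList ≠ "home_cit_".toList ++ Nat.toDigits 10 k ∧
      act.toList ≠ "next_cit_".toList ++ Nat.toDigits 10 k) :
    cit_pager_alt col lim_cit act = col := by
  unfold cit_pager_alt
  simp only [pvSlice9, pvSliceFrom9]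
  split_ifs with hpre hlen hkind hkind2 <;> try rfl
  all_goals {
    exfalso
    obtain ⟨hmem, hsd⟩ := hpre
    have hcan := hcanon hmem hsd hlen
    set m := pvFoldDigits (act.toList.drop 9) with hm
    have hcs : ∀ q : List Char, q.length = 9 → act.toList.take 9 = q →
        act.toList = q ++ Nat.toDigits 10 m := by
      intro q hq htq
      exact (pvMatch_iff act.toList q hq m).mpr ⟨htq, hsd, hcan, rfl⟩
    rcases hmem with hq | hq | hq
    · exact (h m hlen).1 (hcs _ pvLen9_prev hq)
    · exact (h m hlen).2.1 (hcs _ pvLen9_home hq)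
    · exact (h m hlen).2.2 (hcs _ pvLen9_next hq)
  }

theorem pvMain (col : List (List Int)) (lim_cit : List String) (act : String)
    (hcanon : (act.toList.take 9 = "prev_cit_".toList ∨ act.toList.take 9 = "home_cit_".toList ∨
        act.toList.take 9 = "next_cit_".toList) →
      PySem.Chars.strIsdigit (act.toList.drop 9) = true →
      pvFoldDigits (act.toList.drop 9) < col.length →
      (act.toList.drop 9 = ['0'] ∨ (act.toList.drop 9).head? ≠ some '0')) :
    cit_pager col lim_cit act = cit_pager_alt col lim_cit act := by
  by_cases h1 : ∃ k : Nat, k < col.length ∧ act.toList = "prev_cit_".toList ++ Nat.toDigits 10 k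
  · obtain ⟨k, hk, h⟩ := h1
    rw [pvA_prev col lim_cit act k hk h,
      pvB_match col lim_cit act k hk _ pvLen9_prev (Or.inl rfl) h]
    rw [if_neg (by decide), if_pos rfl]
  by_cases h2 : ∃ k : Nat, k < col.length ∧ act.toList = "home_cit_".toList ++ Nat.toDigits 10 k
  · obtain ⟨k, hk, h⟩ := h2
    rw [pvA_home col lim_cit act k hk h,
      pvB_match col lim_cit act k hk _ pvLen9_home (Or.inr (Or.inl rfl)) h]
    rw [if_pos rfl]
  by_cases h3 : ∃ k : Nat, k < col.length ∧ act.toList = "next_cit_".toList ++ Nat.toDigits 10 k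
  · obtain ⟨k, hk, h⟩ := h3
    rw [pvA_next col lim_cit act k hk h,
      pvB_match col lim_cit act k hk _ pvLen9_next (Or.inr (Or.inr rfl)) h]
    rw [if_neg (by decide), if_neg (by decide)]
  push Not at h1 h2 h3
  have h : ∀ k : Nat, k < col.length →
      act.toList ≠ "prev_cit_".toList ++ Nat.toDigits 10 k ∧
      act.toList ≠ "home_cit_".toList ++ Nat.toDigits 10 k ∧
      act.toList ≠ "next_cit_".toList ++ Nat.toDigits 10 k :=
    fun k hk => ⟨h1 k hk, h2 k hk, h3 k hk⟩
  rw [pvA_none col lim_cit act h, pvB_none col lim_cit act hcanon h]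


-- ===== VERDICT (by name: the statement is the Claim_ definition above) =====
theorem cit_pager_spec : Claim_equal_cit_pager := by
  intro col lim act _ hpre
  unfold Spec_cit_pager
  exact pvMain col lim act hpre.2
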